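-- pv_equiv track=rewrite | github.com/Crypto-TII/claasp | claasp/cipher_modules/neural_network_tests.py | _int_difference_to_input_differences
-- ===== SOURCE A (Python) =====
-- def _int_difference_to_input_differences(diff, difference_positions, input_bit_sizes):
--     formated = []
--     """
--         Splits a difference received as an integer into differences for each input that needs one, in integer format.
--     """
--     for i in range(len(input_bit_sizes)):
--         if difference_positions[i]:
--             formated.append(diff & 2 ** input_bit_sizes[i] - 1)
--             diff = diff >> input_bit_sizes[i]
--         else:
--             formated.append(0)
--     return formated
-- ===== SOURCE B (Python) =====
-- def _int_difference_to_input_differences(diff, difference_positions, input_bit_sizes):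
--     # Two passes: first compute each position's absolute bit offset (prefix sum of
--     # active sizes), then read each active slice of diff at its fixed offset,
--     # without ever mutating diff.
--     offsets = []
--     off = 0
--     for pos, size in zip(difference_positions, input_bit_sizes):
--         offsets.append(off)
--         if pos:
--             off += size
--     return [((diff >> o) & ((1 << s) - 1)) if p else 0
--             for (p, s), o in zip(zip(difference_positions, input_bit_sizes), offsets)]
-- ===== Notes on version B (the rewrite author's own statement) =====
-- stated objective: alternative
-- what changed: B replaces A's destructive right-shifting of diff by a two-pass scheme: a prefix-sum pass computes each position's absolute bit offset, then each active slice is read as (diff >> offset) & mask with diff never mutated.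
import Mathlib
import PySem

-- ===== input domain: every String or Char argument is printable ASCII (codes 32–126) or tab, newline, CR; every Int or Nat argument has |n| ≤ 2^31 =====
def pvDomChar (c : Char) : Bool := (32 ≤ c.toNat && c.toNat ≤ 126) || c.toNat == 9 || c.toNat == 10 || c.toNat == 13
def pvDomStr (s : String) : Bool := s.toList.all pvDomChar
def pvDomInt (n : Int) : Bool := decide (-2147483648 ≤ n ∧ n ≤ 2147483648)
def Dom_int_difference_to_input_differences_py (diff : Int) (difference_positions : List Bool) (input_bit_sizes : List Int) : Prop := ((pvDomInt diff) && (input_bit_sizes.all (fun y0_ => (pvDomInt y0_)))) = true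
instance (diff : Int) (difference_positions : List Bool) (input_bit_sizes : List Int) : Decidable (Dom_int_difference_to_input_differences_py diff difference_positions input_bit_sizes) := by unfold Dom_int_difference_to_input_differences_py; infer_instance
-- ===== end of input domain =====

-- B computes each active input's difference at an absolute bit offset (prefix sum
-- of active sizes) instead of destructively right-shifting diff; alternative
-- decomposition, same cost.


-- ===== PORT A =====
-- the `for i in range(len(input_bit_sizes))` loop, carrying (diff, formated);
-- indexing uses getD: Pre_ guarantees i is in range for both lists
def pyALoop (dp : List Bool) (sizes : List Int) (i : Nat) (d : Int) (acc : List Int) : List Int :=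
  if i < sizes.length then
    if dp.getD i false then
      pyALoop dp sizes (i + 1) (d >>> (sizes.getD i 0).toNat)
        (acc ++ [PySem.Int.band d (2 ^ (sizes.getD i 0).toNat - 1)])
    else
      pyALoop dp sizes (i + 1) d (acc ++ [0])
  else acc
termination_by sizes.length - i

def int_difference_to_input_differences_py (diff : Int) (difference_positions : List Bool) (input_bit_sizes : List Int) : List Int :=
  pyALoop difference_positions input_bit_sizes 0 diff []

-- ===== PORT B =====
-- first pass of Source B: per-position absolute bit offsets (prefix sum of active sizes)
def pyBOffsets (pairs : List (Bool × Int)) (off : Int) : List Int :=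
  match pairs with
  | [] => []
  | (p, s) :: rest => off :: pyBOffsets rest (if p then off + s else off)

def int_difference_to_input_differences_py_alt (diff : Int) (difference_positions : List Bool) (input_bit_sizes : List Int) : List Int :=
  let pairs := difference_positions.zip input_bit_sizes
  let offsets := pyBOffsets pairs 0
  (pairs.zip offsets).map (fun q =>
    if q.1.1 then PySem.Int.band (diff >>> q.2.toNat) ((1 <<< q.1.2.toNat) - 1) else 0)

-- ===== PRECONDITION & SPEC =====
-- Pre_ excludes exactly the raising inputs: difference_positions shorter than
-- input_bit_sizes (IndexError) and a negative size at an active position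
-- (2**negative is a float, so `diff & …` raises TypeError).
def Pre_int_difference_to_input_differences_py (diff : Int) (difference_positions : List Bool) (input_bit_sizes : List Int) : Prop :=
  input_bit_sizes.length ≤ difference_positions.length ∧
    ∀ p ∈ difference_positions.zip input_bit_sizes, p.1 = true → 0 ≤ p.2
instance (diff : Int) (difference_positions : List Bool) (input_bit_sizes : List Int) : Decidable (Pre_int_difference_to_input_differences_py diff difference_positions input_bit_sizes) := by unfold Pre_int_difference_to_input_differences_py; infer_instance

def pvWitness_int_difference_to_input_differences_py : Int × List Bool × List Int :=
  (5, [true, false, true], [2, 3, 1])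

def Spec_int_difference_to_input_differences_py (diff : Int) (difference_positions : List Bool) (input_bit_sizes : List Int) (out : List Int) : Prop := out = int_difference_to_input_differences_py_alt diff difference_positions input_bit_sizes
instance (diff : Int) (difference_positions : List Bool) (input_bit_sizes : List Int) (out : List Int) : Decidable (Spec_int_difference_to_input_differences_py diff difference_positions input_bit_sizes out) := by unfold Spec_int_difference_to_input_differences_py; infer_instance

-- ===== CLAIM (what is proved, stated in full; the proofs are below) =====
def Claim_equal_int_difference_to_input_differences_py : Prop := ∀ (diff : Int) (difference_positions : List Bool) (input_bit_sizes : List Int), Dom_int_difference_to_input_differences_py diff difference_positions input_bit_sizes → Pre_int_difference_to_input_differences_py diff difference_positions input_bit_sizes → Spec_int_difference_to_input_differences_py diff difference_positions input_bit_sizes (int_difference_to_input_differences_py diff difference_positions input_bit_sizes)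

-- ===== LEMMAS AND PROOFS =====

-- common reference form: structural recursion on the (position, size) pairs
def gSpec : Int → List (Bool × Int) → List Int
  | _, [] => []
  | d, (p, s) :: rest =>
    if p then PySem.Int.band d (2 ^ s.toNat - 1) :: gSpec (d >>> s.toNat) rest
    else 0 :: gSpec d rest

theorem zip_drop_cons {dp : List Bool} {sizes : List Int} {i : Nat}
    (hi : i < sizes.length) (hlen : sizes.length ≤ dp.length) :
    (dp.zip sizes).drop i = (dp.getD i false, sizes.getD i 0) :: (dp.zip sizes).drop (i + 1) := by
  have hidp : i < dp.length := lt_of_lt_of_le hi hlen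
  have hiz : i < (dp.zip sizes).length := by simp [List.length_zip]; omega
  rw [List.drop_eq_getElem_cons hiz]
  simp [List.getElem_zip, List.getD_eq_getElem?_getD, hidp, hi]

theorem pyALoop_eq_gSpec (dp : List Bool) (sizes : List Int)
    (hlen : sizes.length ≤ dp.length) :
    ∀ i d acc, pyALoop dp sizes i d acc = acc ++ gSpec d ((dp.zip sizes).drop i) := by
  intro i
  induction hn : sizes.length - i using Nat.strong_induction_on generalizing i with
  | _ n ih =>
    intro d acc
    rw [pyALoop]
    by_cases hi : i < sizes.length
    · rw [zip_drop_cons hi hlen]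
      have hrec : sizes.length - (i + 1) < n := by omega
      by_cases hp : dp.getD i false
      · simp only [hi, if_true, hp, gSpec]
        rw [ih _ hrec _ rfl, List.append_assoc]
        simp
      · have hp' : dp.getD i false = false := by simpa using hp
        simp only [hi, if_true, hp', gSpec, Bool.false_eq_true, if_false]
        rw [ih _ hrec _ rfl, List.append_assoc]
        simp
    · have hnil : (dp.zip sizes).drop i = [] := by
        apply List.drop_eq_nil_of_le
        simp [List.length_zip]; omega
      simp [hi, hnil, gSpec]

theorem pyB_eq_gSpec (diff : Int) :
    ∀ (pairs : List (Bool × Int)) (off : Int), 0 ≤ off →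
    (∀ p ∈ pairs, p.1 = true → 0 ≤ p.2) →
    (pairs.zip (pyBOffsets pairs off)).map (fun q =>
      if q.1.1 then PySem.Int.band (diff >>> q.2.toNat) ((1 <<< q.1.2.toNat) - 1) else 0)
      = gSpec (diff >>> off.toNat) pairs := by
  intro pairs
  induction pairs with
  | nil => intro off _ _; simp [pyBOffsets, gSpec]
  | cons hd tl ih =>
    intro off hoff hnn
    obtain ⟨p, s⟩ := hd
    cases p with
    | false =>
      simp only [pyBOffsets, if_false, List.zip_cons_cons, List.map_cons, gSpec,
        Bool.false_eq_true]
      rw [ih off hoff (fun q hq => hnn q (by simp [hq]))]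
    | true =>
      have hs : 0 ≤ s := hnn (true, s) (by simp) rfl
      have hmask : ((1 : Int) <<< s.toNat) - 1 = 2 ^ s.toNat - 1 := by
        simp [Int.shiftLeft_eq]
      have hshift : diff >>> (off + s).toNat = (diff >>> off.toNat) >>> s.toNat := by
        rw [← Int.shiftRight_add]
        congr 1
        omega
      simp only [pyBOffsets, if_true, List.zip_cons_cons, List.map_cons, gSpec]
      rw [ih (off + s) (by omega) (fun q hq => hnn q (by simp [hq])), hshift]
      simp [hmask]

-- ===== VERDICT (by name: the statement is the Claim_ definition above) =====
theorem int_difference_to_input_differences_py_spec : Claim_equal_int_difference_to_input_differences_py := by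
  intro diff dp sizes _ hpre
  obtain ⟨hlen, hnn⟩ := hpre
  unfold Spec_int_difference_to_input_differences_py
  unfold int_difference_to_input_differences_py int_difference_to_input_differences_py_alt
  rw [pyALoop_eq_gSpec dp sizes hlen 0 diff []]
  rw [pyB_eq_gSpec diff (dp.zip sizes) 0 le_rfl hnn]
  simp
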